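-- pv_equiv track=rewrite | github.com/davewalker5/ti-84-python | src/computing/ipv4bits.py | subnet_for_networks
-- ===== SOURCE A (Python) =====
-- def subnet_for_networks(network_bits, number_of_networks):
--     """
--     Given a number of networks and current network bits, calculate the number of network bits and subnet
--     bits required to accommodate that many subnets
--
--     :param network_bits: Current number of network bits
--     :param number_of_networks: Number of subnets required
--     :return: Tuple of the number of network bits and subnet bits
--     """
--     number_of_subnet_bits = 0
--     new_network_bits = 0
--
--     for n in range(0, 32):
--         number_of_networks_for_n = pow(2, n)
--         if number_of_networks_for_n >= number_of_networks:
--             number_of_subnet_bits = n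
--             new_network_bits = network_bits + n
--             break
--
--     return new_network_bits, number_of_subnet_bits
-- ===== SOURCE B (Python) =====
-- def subnet_for_networks(network_bits, number_of_networks):
--     """Closed form: smallest n with 2**n >= number_of_networks via bit_length."""
--     n = 0 if number_of_networks <= 1 else (number_of_networks - 1).bit_length()
--     return network_bits + n, n
-- ===== Notes on version B (the rewrite author's own statement) =====
-- stated objective: simpler
-- what changed: Replaced the 32-iteration search loop with a closed form: the smallest n with 2^n >= number_of_networks is (number_of_networks-1).bit_length() (0 when the requested count is at most 1).
import Mathlib
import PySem

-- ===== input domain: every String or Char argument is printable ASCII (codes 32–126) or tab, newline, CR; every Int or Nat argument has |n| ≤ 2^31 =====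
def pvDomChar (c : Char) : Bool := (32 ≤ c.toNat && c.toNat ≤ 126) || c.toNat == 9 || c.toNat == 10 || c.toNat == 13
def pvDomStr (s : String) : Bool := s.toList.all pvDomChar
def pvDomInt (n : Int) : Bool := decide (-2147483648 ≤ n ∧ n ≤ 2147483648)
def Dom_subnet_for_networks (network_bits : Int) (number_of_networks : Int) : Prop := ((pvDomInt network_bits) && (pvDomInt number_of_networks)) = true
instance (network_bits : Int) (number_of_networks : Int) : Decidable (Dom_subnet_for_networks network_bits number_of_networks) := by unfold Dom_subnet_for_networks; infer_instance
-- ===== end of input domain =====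

-- B replaces A's 32-step search loop by a closed form using bit_length (objective: simpler).

-- ===== PORT A =====
-- A's for-loop with break: iterate over range(0, 32); on the first n with 2^n >= m,
-- set the two result variables and stop; otherwise keep the initial (0, 0).
def subnetLoopA (network_bits : Int) (number_of_networks : Int) :
    List Int → Int × Int → Int × Int
  | [], acc => acc
  | n :: rest, acc =>
      let number_of_networks_for_n : Int := (2 : Int) ^ n.toNat
      if number_of_networks_for_n ≥ number_of_networks then
        (network_bits + n, n)
      else
        subnetLoopA network_bits number_of_networks rest acc

def subnet_for_networks (network_bits : Int) (number_of_networks : Int) : Int × Int :=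
  subnetLoopA network_bits number_of_networks (PySem.List.pyRange 0 32 1) (0, 0)

-- ===== PORT B =====
-- (x).bit_length() for x ≥ 0 is exactly Nat.size.
def subnet_for_networks_alt (network_bits : Int) (number_of_networks : Int) : Int × Int :=
  let n : Int :=
    if number_of_networks ≤ 1 then 0
    else Int.ofNat (Nat.size (number_of_networks - 1).toNat)
  (network_bits + n, n)

-- ===== PRECONDITION & SPEC =====
def Spec_subnet_for_networks (network_bits : Int) (number_of_networks : Int) (out : Int × Int) : Prop := out = subnet_for_networks_alt network_bits number_of_networks
instance (network_bits : Int) (number_of_networks : Int) (out : Int × Int) : Decidable (Spec_subnet_for_networks network_bits number_of_networks out) := by unfold Spec_subnet_for_networks; infer_instance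

-- ===== CLAIM (what is proved, stated in full; the proofs are below) =====
def Claim_equal_subnet_for_networks : Prop := ∀ (network_bits : Int) (number_of_networks : Int), Dom_subnet_for_networks network_bits number_of_networks → Spec_subnet_for_networks network_bits number_of_networks (subnet_for_networks network_bits number_of_networks)

-- ===== LEMMAS AND PROOFS =====

-- Skipping a prefix of failing candidates.
theorem subnetLoopA_append (nb m : Int) (acc : Int × Int) (l1 l2 : List Int)
    (h : ∀ j ∈ l1, (2 : Int) ^ j.toNat < m) :
    subnetLoopA nb m (l1 ++ l2) acc = subnetLoopA nb m l2 acc := by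
  induction l1 with
  | nil => rfl
  | cons a t ih =>
      have ha := h a (by simp)
      simp only [List.cons_append, subnetLoopA]
      rw [if_neg (by omega)]
      exact ih (fun j hj => h j (by simp [hj]))

theorem pyRange_explicit :
    PySem.List.pyRange 0 32 1 = (List.range' 0 32).map Int.ofNat := by decide

-- The loop returns (nb + k, k) when k < 32 is the first exponent with 2^k ≥ m.
theorem subnetLoopA_finds (nb m : Int) (acc : Int × Int) (k : Nat) (hk : k < 32)
    (h2 : m ≤ (2 : Int) ^ k) (h3 : ∀ j : Nat, j < k → (2 : Int) ^ j < m) :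
    subnetLoopA nb m (PySem.List.pyRange 0 32 1) acc = (nb + (k : Int), (k : Int)) := by
  rw [pyRange_explicit]
  obtain ⟨d, hd32⟩ : ∃ d, 32 - k = d + 1 := ⟨32 - k - 1, by omega⟩
  have hsplit : List.range' 0 32 = List.range' 0 k ++ List.range' k (32 - k) := by
    calc List.range' 0 32 = List.range' 0 (k + (32 - k)) := by rw [Nat.add_sub_cancel' (by omega)]
      _ = List.range' 0 k ++ List.range' (0 + 1 * k) (32 - k) := (List.range'_append ..).symm
      _ = List.range' 0 k ++ List.range' k (32 - k) := by simp
  rw [hsplit, List.map_append]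
  rw [subnetLoopA_append _ _ _ _ _ (by
    intro j hj
    simp only [List.mem_map, List.mem_range'_1] at hj
    obtain ⟨i, hi, rfl⟩ := hj
    simpa using h3 i (by omega))]
  have hcons : List.range' k (32 - k) = k :: List.range' (k + 1) d := by
    rw [hd32, List.range'_succ]
  rw [hcons]
  simp only [List.map_cons, subnetLoopA]
  rw [if_pos (by simpa using h2)]
  simp [Int.ofNat_eq_natCast]

theorem subnet_for_networks_eq (nb m : Int) (hd : Dom_subnet_for_networks nb m) :
    subnet_for_networks nb m = subnet_for_networks_alt nb m := by
  have hm : m ≤ 2147483648 := by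
    simp only [Dom_subnet_for_networks, pvDomInt, Bool.and_eq_true, decide_eq_true_eq] at hd
    exact hd.2.2
  by_cases h1 : m ≤ 1
  · have : subnet_for_networks nb m = (nb + (0 : Nat), ((0 : Nat) : Int)) :=
      subnetLoopA_finds nb m (0, 0) 0 (by omega) (by simpa using h1) (by omega)
    simp only [subnet_for_networks_alt, if_pos h1]
    simpa using this
  · push Not at h1
    set x : Nat := (m - 1).toNat with hx
    have hxm : (x : Int) = m - 1 := by omega
    have hx1 : 1 ≤ x := by omega
    set k : Nat := Nat.size x with hkdef
    have hlt : x < 2 ^ k := Nat.lt_size_self x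
    have hge : 2 ^ (k - 1) ≤ x := by
      have hk1 : 1 ≤ k := by
        rw [hkdef]
        exact Nat.lt_size.mpr (by simpa using hx1)
      have := Nat.lt_size (m := k - 1) (n := x)
      exact this.mp (by omega)
    have hk32 : k < 32 := by
      have : k ≤ 31 := Nat.size_le.mpr (by omega)
      omega
    have h2 : m ≤ (2 : Int) ^ k := by
      have : ((x : Int)) < ((2 : Nat) ^ k : Nat) := by exact_mod_cast hlt
      push_cast at this ⊢
      omega
    have h3 : ∀ j : Nat, j < k → (2 : Int) ^ j < m := by
      intro j hj
      have hmono : (2 : Nat) ^ j ≤ 2 ^ (k - 1) := Nat.pow_le_pow_right (by omega) (by omega)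
      have : ((2 : Nat) ^ j : Int) ≤ ((2 : Nat) ^ (k - 1) : Nat) := by exact_mod_cast hmono
      have hge' : (((2 : Nat) ^ (k - 1) : Nat) : Int) ≤ (x : Int) := by exact_mod_cast hge
      push_cast at this hge' ⊢
      omega
    have hA := subnetLoopA_finds nb m (0, 0) k hk32 h2 h3
    simp only [subnet_for_networks_alt, if_neg (by omega : ¬ m ≤ 1)]
    rw [subnet_for_networks, hA]
    simp [hkdef, hx]

-- ===== VERDICT (by name: the statement is the Claim_ definition above) =====
theorem subnet_for_networks_spec : Claim_equal_subnet_for_networks := by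
  intro nb m hd
  exact subnet_for_networks_eq nb m hd
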